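-- pv_equiv track=rewrite | github.com/minhyuk2/programming-language | 20202920 7/20202920_PL1.py | bexpr
-- ===== SOURCE A (Python) =====
-- def relop(array):
--     if array in ["==", "!=", "<", ">", "<=", ">="]:
--         return array
--     else:
--         return "wrong"
--
-- def bexpr(array):
--     token = ""
--     number_count = 0
--     number1 = 0
--     number2 = 0
--     logic = ""
--
--     for char in array:
--         if char != ' ':
--             token += char
--         else:
--             if token:
--                 try:
--                     if number_count == 0:
--                         number1 = int(token)
--                         number_count += 1
--                     elif number_count == 1:
--                         logic = relop(token)
--                         number_count += 1
--                     elif number_count == 2: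
--                         number2 = int(token)
--                         number_count += 1
--                 except ValueError:
--                     return "wrong"
--             token = ""
--
--     if token:
--         return "wrong"
--
--     if number_count != 3:
--         return "wrong"
--
--     if logic == "==":
--         return "TRUE" if number1 == number2 else "FALSE"
--     elif logic == "!=":
--         return "TRUE" if number1 != number2 else "FALSE"
--     elif logic == "<":
--         return "TRUE" if number1 < number2 else "FALSE"
--     elif logic == ">":
--         return "TRUE" if number1 > number2 else "FALSE"
--     elif logic == "<=":
--         return "TRUE" if number1 <= number2 else "FALSE"
--     elif logic == ">=":
--         return "TRUE" if number1 >= number2 else "FALSE"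
--     else:
--         return "wrong"
-- ===== SOURCE B (Python) =====
-- def bexpr(array):
--     parts = array.split(' ')
--     if parts[-1]:
--         return "wrong"
--     toks = [p for p in parts[:-1] if p]
--     if len(toks) < 3:
--         return "wrong"
--     try:
--         number1 = int(toks[0])
--         number2 = int(toks[2])
--     except ValueError:
--         return "wrong"
--     op = toks[1]
--     if op == "==":
--         return "TRUE" if number1 == number2 else "FALSE"
--     elif op == "!=":
--         return "TRUE" if number1 != number2 else "FALSE"
--     elif op == "<":
--         return "TRUE" if number1 < number2 else "FALSE"
--     elif op == ">":
--         return "TRUE" if number1 > number2 else "FALSE"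
--     elif op == "<=":
--         return "TRUE" if number1 <= number2 else "FALSE"
--     elif op == ">=":
--         return "TRUE" if number1 >= number2 else "FALSE"
--     else:
--         return "wrong"
-- ===== Notes on version B (the rewrite author's own statement) =====
-- stated objective: simpler
-- what changed: B replaces A's char-by-char state machine (token accumulator + counter + early returns inside the scan) with a split-then-index decomposition: split on a single space, reject a non-empty trailing segment, drop empty tokens, parse the first three kept tokens directly and ignore the rest.
import Mathlib
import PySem

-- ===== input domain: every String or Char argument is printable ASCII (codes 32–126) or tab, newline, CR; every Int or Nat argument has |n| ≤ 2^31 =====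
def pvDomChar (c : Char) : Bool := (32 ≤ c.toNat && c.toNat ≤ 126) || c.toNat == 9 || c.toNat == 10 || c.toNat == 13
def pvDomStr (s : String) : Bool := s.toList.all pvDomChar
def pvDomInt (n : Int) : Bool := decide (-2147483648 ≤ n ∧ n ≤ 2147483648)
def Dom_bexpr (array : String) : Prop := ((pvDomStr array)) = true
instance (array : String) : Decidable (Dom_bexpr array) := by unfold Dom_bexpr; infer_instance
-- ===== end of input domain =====

-- B replaces A's char-by-char token state machine with a split(' ')-then-index decomposition (objective: simpler; same return values).


-- shared transliteration of the identical final if/elif evaluation chain of both Pythons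
def evalRel (logic : List Char) (n1 n2 : Int) : String :=
  if logic = "==".toList then (if n1 = n2 then "TRUE" else "FALSE")
  else if logic = "!=".toList then (if n1 ≠ n2 then "TRUE" else "FALSE")
  else if logic = "<".toList then (if n1 < n2 then "TRUE" else "FALSE")
  else if logic = ">".toList then (if n2 < n1 then "TRUE" else "FALSE")
  else if logic = "<=".toList then (if n1 ≤ n2 then "TRUE" else "FALSE")
  else if logic = ">=".toList then (if n2 ≤ n1 then "TRUE" else "FALSE")
  else "wrong"

-- ===== PORT A =====
-- helper relop of A
def relopA (t : List Char) : List Char :=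
  if t ∈ ["==".toList, "!=".toList, "<".toList, ">".toList, "<=".toList, ">=".toList] then t
  else "wrong".toList

structure StA where
  token : List Char
  cnt : Int
  n1 : Int
  n2 : Int
  logic : List Char
deriving Repr, DecidableEq

-- one loop iteration of A; none = the early `return "wrong"` on ValueError
def stepA (st : StA) (c : Char) : Option StA :=
  if c ≠ ' ' then some { st with token := st.token ++ [c] }
  else if st.token ≠ [] then
    if st.cnt = 0 then
      (PySem.Int.ofChars? st.token).map (fun v => { st with token := [], cnt := st.cnt + 1, n1 := v })
    else if st.cnt = 1 then
      some { st with token := [], cnt := st.cnt + 1, logic := relopA st.token }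
    else if st.cnt = 2 then
      (PySem.Int.ofChars? st.token).map (fun v => { st with token := [], cnt := st.cnt + 1, n2 := v })
    else some { st with token := [] }
  else some { st with token := [] }

def bexpr (array : String) : String :=
  match array.toList.foldl (fun acc c => acc.bind (fun st => stepA st c))
      (some { token := [], cnt := 0, n1 := 0, n2 := 0, logic := [] }) with
  | none => "wrong"
  | some st =>
    if st.token ≠ [] then "wrong"
    else if st.cnt ≠ 3 then "wrong"
    else evalRel st.logic st.n1 st.n2

-- ===== PORT B =====
def bexpr_alt (array : String) : String :=
  let parts := PySem.Chars.splitOn array.toList " ".toList   -- array.split(' ')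
  if PySem.List.pyGetD parts (-1) [] ≠ [] then "wrong"       -- if parts[-1]: return "wrong"
  else
    let toks := (PySem.List.slice parts none (some (-1))).filter (fun p => p ≠ [])  -- [p for p in parts[:-1] if p]
    if toks.length < 3 then "wrong"
    else
      match PySem.Int.ofChars? (PySem.List.pyGetD toks 0 []),
            PySem.Int.ofChars? (PySem.List.pyGetD toks 2 []) with
      | some n1, some n2 => evalRel (PySem.List.pyGetD toks 1 []) n1 n2
      | _, _ => "wrong"

-- ===== PRECONDITION & SPEC =====
def Spec_bexpr (array : String) (out : String) : Prop := out = bexpr_alt array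
instance (array : String) (out : String) : Decidable (Spec_bexpr array out) := by unfold Spec_bexpr; infer_instance

-- ===== CLAIM (what is proved, stated in full; the proofs are below) =====
def Claim_equal_bexpr : Prop := ∀ (array : String), Dom_bexpr array → Spec_bexpr array (bexpr array)

-- ===== LEMMAS AND PROOFS =====

-- reference single-space split, structurally recursive
def splitSp : List Char → List (List Char)
  | [] => [[]]
  | c :: rest =>
    if c = ' ' then [] :: splitSp rest
    else match splitSp rest with
      | [] => [[c]]
      | h :: t => (c :: h) :: t

def consH (p : List Char) : List (List Char) → List (List Char)
  | [] => [p]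
  | h :: t => (p ++ h) :: t

lemma splitSp_ne_nil (cs : List Char) : splitSp cs ≠ [] := by
  cases cs with
  | nil => simp [splitSp]
  | cons c rest =>
    simp only [splitSp]
    split_ifs
    · simp
    · cases h : splitSp rest <;> simp

lemma consH_nil_eq (ps : List (List Char)) (h : ps ≠ []) : consH [] ps = ps := by
  cases ps with
  | nil => exact absurd rfl h
  | cons a t => simp [consH]

lemma consH_consH (p q : List Char) (ps : List (List Char)) :
    consH p (consH q ps) = consH (p ++ q) ps := by
  cases ps <;> simp [consH]

lemma go_spec (fuel : Nat) : ∀ (l cur : List Char) (accs : List (List Char)),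
    l.length < fuel →
    PySem.Chars.splitOn.go [' '] fuel l cur accs =
      accs.reverse ++ consH cur.reverse (splitSp l) := by
  induction fuel with
  | zero => intro l cur accs h; omega
  | succ f ih =>
    intro l cur accs h
    cases l with
    | nil =>
      simp [PySem.Chars.splitOn.go, splitSp, consH]
    | cons c rest =>
      by_cases hc : c = ' '
      · subst hc
        have hpre : [' '].isPrefixOf (' ' :: rest) = true := by simp [List.isPrefixOf]
        simp only [PySem.Chars.splitOn.go, hpre, if_pos]
        rw [show List.drop [' '].length (' ' :: rest) = rest from rfl]
        rw [ih rest [] (cur.reverse :: accs) (by simpa using Nat.lt_of_succ_lt_succ h)]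
        simp only [List.reverse_nil]
        rw [consH_nil_eq _ (splitSp_ne_nil rest)]
        simp [splitSp, consH]
      · have hpre : [' '].isPrefixOf (c :: rest) = false := by
          simp [List.isPrefixOf]
          exact fun hh => hc hh.symm
        simp only [PySem.Chars.splitOn.go, hpre, Bool.false_eq_true, if_false]
        rw [ih rest (c :: cur) accs (by simpa using Nat.lt_of_succ_lt_succ h)]
        have : splitSp (c :: rest) = consH [c] (splitSp rest) := by
          simp only [splitSp, if_neg hc]
          cases hsp : splitSp rest with
          | nil => simp [consH]
          | cons hh tt => simp [consH]
        rw [this, consH_consH]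
        simp

lemma splitOn_eq_splitSp (cs : List Char) :
    PySem.Chars.splitOn cs " ".toList = splitSp cs := by
  have hsep : (" ".toList : List Char) = [' '] := by decide
  rw [hsep]
  show PySem.Chars.splitOn.go [' '] (cs.length + 1) cs [] [] = splitSp cs
  rw [go_spec (cs.length + 1) cs [] [] (by omega)]
  simpa using consH_nil_eq _ (splitSp_ne_nil cs)

-- A's fold, abbreviations
def foldSt (o : Option StA) (cs : List Char) : Option StA :=
  cs.foldl (fun acc c => acc.bind (fun st => stepA st c)) o

def addTok (st : StA) (t : List Char) : StA := { st with token := st.token ++ t }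

-- the space-branch of stepA
def finish (st : StA) : Option StA :=
  if st.token ≠ [] then
    if st.cnt = 0 then
      (PySem.Int.ofChars? st.token).map (fun v => { st with token := [], cnt := st.cnt + 1, n1 := v })
    else if st.cnt = 1 then
      some { st with token := [], cnt := st.cnt + 1, logic := relopA st.token }
    else if st.cnt = 2 then
      (PySem.Int.ofChars? st.token).map (fun v => { st with token := [], cnt := st.cnt + 1, n2 := v })
    else some { st with token := [] }
  else some { st with token := [] }

def runAll (o : Option StA) (ps : List (List Char)) : Option StA :=
  ps.foldl (fun o p => o.bind (fun st => finish (addTok st p))) o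

-- token-level step (a nonempty token followed by a space)
def stepTok (st : StA) (t : List Char) : Option StA :=
  if st.cnt = 0 then
    (PySem.Int.ofChars? t).map (fun v => { st with token := [], cnt := st.cnt + 1, n1 := v })
  else if st.cnt = 1 then
    some { st with token := [], cnt := st.cnt + 1, logic := relopA t }
  else if st.cnt = 2 then
    (PySem.Int.ofChars? t).map (fun v => { st with token := [], cnt := st.cnt + 1, n2 := v })
  else some { st with token := [] }

def runTok (o : Option StA) (ts : List (List Char)) : Option StA :=
  ts.foldl (fun o t => o.bind (fun st => stepTok st t)) o

lemma foldSt_cons (o : Option StA) (c : Char) (cs : List Char) :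
    foldSt o (c :: cs) = foldSt (o.bind (fun st => stepA st c)) cs := rfl

lemma runAll_cons (o : Option StA) (p : List Char) (ps : List (List Char)) :
    runAll o (p :: ps) = runAll (o.bind (fun st => finish (addTok st p))) ps := rfl

lemma runTok_cons (o : Option StA) (t : List Char) (ts : List (List Char)) :
    runTok o (t :: ts) = runTok (o.bind (fun st => stepTok st t)) ts := rfl

lemma stepA_space (st : StA) : stepA st ' ' = finish st := by
  simp [stepA, finish]

lemma stepA_nospace (st : StA) (c : Char) (hc : c ≠ ' ') :
    stepA st c = some (addTok st [c]) := by
  simp [stepA, addTok, hc]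

lemma foldSt_none (cs : List Char) : foldSt none cs = none := by
  induction cs <;> simp_all [foldSt]

lemma runAll_none (ps : List (List Char)) : runAll none ps = none := by
  induction ps <;> simp_all [runAll]

lemma runTok_none (ts : List (List Char)) : runTok none ts = none := by
  induction ts <;> simp_all [runTok]

lemma addTok_nil (st : StA) : addTok st [] = st := by
  simp [addTok]

lemma addTok_addTok (st : StA) (a b : List Char) :
    addTok (addTok st a) b = addTok st (a ++ b) := by
  simp [addTok]

-- main bridge: A's character fold = token-level runs over splitSp's pieces
lemma foldSt_eq_runAll (cs : List Char) : ∀ (st : StA),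
    foldSt (some st) cs =
      (runAll (some st) (splitSp cs).dropLast).map
        (fun st' => addTok st' ((splitSp cs).getLastD [])) := by
  induction cs with
  | nil =>
    intro st
    simp [foldSt, splitSp, runAll, addTok_nil]
  | cons c rest ih =>
    intro st
    rw [foldSt_cons]
    by_cases hc : c = ' '
    · subst hc
      simp only [Option.bind_some, stepA_space]
      have hsp : splitSp (' ' :: rest) = [] :: splitSp rest := by simp [splitSp]
      rw [hsp, List.dropLast_cons_of_ne_nil (splitSp_ne_nil rest)]
      have hgl : (([] : List Char) :: splitSp rest).getLastD [] = (splitSp rest).getLastD [] := by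
        cases hx : splitSp rest with
        | nil => exact absurd hx (splitSp_ne_nil rest)
        | cons a t => simp
      rw [hgl, runAll_cons]
      simp only [Option.bind_some, addTok_nil]
      cases hf : finish st with
      | none => rw [runAll_none, foldSt_none]; rfl
      | some st' => exact ih st'
    · simp only [Option.bind_some, stepA_nospace st c hc]
      rw [ih (addTok st [c])]
      cases hsp : splitSp rest with
      | nil => exact absurd hsp (splitSp_ne_nil rest)
      | cons h t =>
        have hsp' : splitSp (c :: rest) = (c :: h) :: t := by
          simp only [splitSp, if_neg hc, hsp]
        rw [hsp']
        cases t with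
        | nil =>
          simp [runAll, addTok_addTok]
        | cons q t' =>
          rw [show ((c :: h) :: q :: t').dropLast = (c :: h) :: (q :: t').dropLast from rfl,
              show (h :: q :: t').dropLast = h :: (q :: t').dropLast from rfl,
              show ((c :: h) :: q :: t').getLastD [] = (q :: t').getLastD [] from rfl,
              show (h :: q :: t').getLastD [] = (q :: t').getLastD [] from rfl,
              runAll_cons, runAll_cons]
          simp only [Option.bind_some, addTok_addTok]
          rfl

lemma finish_addTok (st : StA) (hst : st.token = []) (t : List Char) :
    finish (addTok st t) = if t = [] then some st else stepTok st t := by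
  obtain ⟨tk, c, a, b, l⟩ := st
  simp only at hst
  subst hst
  by_cases ht : t = []
  · subst ht; simp [finish, addTok]
  · simp [finish, addTok, ht, stepTok]

lemma stepTok_token_nil (st st' : StA) (t : List Char) (h : stepTok st t = some st') :
    st'.token = [] := by
  unfold stepTok at h
  split_ifs at h
  · cases hp : PySem.Int.ofChars? t <;> rw [hp] at h
    · cases h
    · rw [Option.map_some, Option.some_inj] at h; subst h; rfl
  · rw [Option.some_inj] at h; subst h; rfl
  · cases hp : PySem.Int.ofChars? t <;> rw [hp] at h
    · cases h
    · rw [Option.map_some, Option.some_inj] at h; subst h; rfl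
  · rw [Option.some_inj] at h; subst h; rfl

lemma runAll_eq_runTok (ps : List (List Char)) : ∀ (st : StA), st.token = [] →
    runAll (some st) ps = runTok (some st) (ps.filter (fun p => p ≠ [])) := by
  induction ps with
  | nil => intro st _; rfl
  | cons p ps ih =>
    intro st hst
    rw [runAll_cons]
    simp only [Option.bind_some, finish_addTok st hst]
    by_cases hp : p = []
    · simp only [if_pos hp]
      rw [ih st hst]
      have : (p :: ps).filter (fun p => p ≠ []) = ps.filter (fun p => p ≠ []) := by
        simp [hp]
      rw [this]
    · simp only [if_neg hp]
      have hfil : (p :: ps).filter (fun p => p ≠ []) = p :: ps.filter (fun p => p ≠ []) := by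
        simp [hp]
      rw [hfil, runTok_cons, Option.bind_some]
      cases hs : stepTok st p with
      | none => rw [runAll_none, runTok_none]
      | some st' => exact ih st' (stepTok_token_nil st st' p hs)

lemma runTok_cnt3 (ts : List (List Char)) : ∀ (st : StA), st.token = [] → st.cnt = 3 →
    runTok (some st) ts = some st := by
  induction ts with
  | nil => intro st _ _; rfl
  | cons t ts ih =>
    intro st hst hcnt
    have hs : stepTok st t = some st := by
      obtain ⟨tk, c, a, b, l⟩ := st
      simp only at hst hcnt
      subst hst; subst hcnt
      simp [stepTok]
    rw [runTok_cons, Option.bind_some, hs]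
    exact ih st hst hcnt

lemma evalRel_relopA (t : List Char) (n1 n2 : Int) :
    evalRel (relopA t) n1 n2 = evalRel t n1 n2 := by
  unfold relopA
  split_ifs with h
  · rfl
  · simp only [List.mem_cons, List.not_mem_nil, or_false, not_or] at h
    obtain ⟨h1, h2, h3, h4, h5, h6⟩ := h
    rw [show evalRel "wrong".toList n1 n2 = "wrong" from by
          rw [evalRel, if_neg (by decide), if_neg (by decide), if_neg (by decide),
              if_neg (by decide), if_neg (by decide), if_neg (by decide)],
        show evalRel t n1 n2 = "wrong" from by
          rw [evalRel, if_neg h1, if_neg h2, if_neg h3, if_neg h4, if_neg h5, if_neg h6]]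

-- final assembly of A's result from the token-level run
def resA (o : Option StA) (lastTok : List Char) : String :=
  match o.map (fun st' => addTok st' lastTok) with
  | none => "wrong"
  | some st =>
    if st.token ≠ [] then "wrong"
    else if st.cnt ≠ 3 then "wrong"
    else evalRel st.logic st.n1 st.n2

def st0 : StA := { token := [], cnt := 0, n1 := 0, n2 := 0, logic := [] }

lemma bexpr_eq_resA (array : String) :
    bexpr array =
      resA (runTok (some st0) (((splitSp array.toList).dropLast).filter (fun p => p ≠ [])))
        ((splitSp array.toList).getLastD []) := by
  unfold bexpr
  rw [show (array.toList.foldl (fun acc c => acc.bind (fun st => stepA st c))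
      (some { token := [], cnt := 0, n1 := 0, n2 := 0, logic := [] }))
      = foldSt (some st0) array.toList from rfl]
  rw [foldSt_eq_runAll, runAll_eq_runTok _ st0 rfl]
  rfl

-- B's branches, analyzed over the token list
lemma bexpr_alt_eq (array : String) :
    bexpr_alt array =
      (let ps := splitSp array.toList
       if ps.getLastD [] ≠ [] then "wrong"
       else
         let toks := ps.dropLast.filter (fun p => p ≠ [])
         if toks.length < 3 then "wrong"
         else
           match PySem.Int.ofChars? (toks.getD 0 []), PySem.Int.ofChars? (toks.getD 2 []) with
           | some n1, some n2 => evalRel (toks.getD 1 []) n1 n2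
           | _, _ => "wrong") := by
  unfold bexpr_alt
  dsimp only
  rw [splitOn_eq_splitSp]
  have hne := splitSp_ne_nil array.toList
  have hgl : PySem.List.pyGetD (splitSp array.toList) (-1) ([] : List Char)
      = (splitSp array.toList).getLastD [] := by
    rw [PySem.List.pyGetD_neg_one (h := hne), List.getLastD_eq_getLast?,
      List.getLast?_eq_some_getLast hne]
    rfl
  simp only [PySem.List.slice_to_neg_one, hgl, PySem.List.pyGetD_ofNat']

-- evaluate the token run for a token list of length ≥ 3
lemma runTok_result (t0 t1 t2 : List Char) (rest : List (List Char)) :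
    resA (runTok (some st0) (t0 :: t1 :: t2 :: rest)) [] =
      (match PySem.Int.ofChars? t0, PySem.Int.ofChars? t2 with
       | some n1, some n2 => evalRel t1 n1 n2
       | _, _ => "wrong") := by
  rw [runTok_cons, Option.bind_some]
  cases h0 : PySem.Int.ofChars? t0 with
  | none =>
    simp only [stepTok, st0, h0, Option.map_none, if_true, zero_add]
    rw [runTok_none]
    rfl
  | some v1 =>
    simp only [stepTok, st0, h0, Option.map_some, if_true, zero_add]
    rw [runTok_cons, Option.bind_some]
    rw [show stepTok { token := [], cnt := 1, n1 := v1, n2 := 0, logic := [] } t1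
        = some { token := [], cnt := 2, n1 := v1, n2 := 0, logic := relopA t1 } from by
      norm_num [stepTok]]
    rw [runTok_cons, Option.bind_some]
    rw [show stepTok { token := [], cnt := 2, n1 := v1, n2 := 0, logic := relopA t1 } t2
        = (PySem.Int.ofChars? t2).map
            (fun v => { token := [], cnt := 3, n1 := v1, n2 := v, logic := relopA t1 }) from by
      norm_num [stepTok]]
    cases h2 : PySem.Int.ofChars? t2 with
    | none =>
      rw [Option.map_none, runTok_none]
      rfl
    | some v2 =>
      rw [Option.map_some, runTok_cnt3 rest _ rfl rfl]
      simp [resA, addTok_nil, evalRel_relopA]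

-- short token lists always give "wrong" on the A side (with empty final token)
lemma runTok_short (ts : List (List Char)) (hlen : ts.length < 3) :
    resA (runTok (some st0) ts) [] = "wrong" := by
  match ts, hlen with
  | [], _ => rfl
  | [t0], _ =>
    rw [runTok_cons, Option.bind_some]
    cases h0 : PySem.Int.ofChars? t0 with
    | none =>
      simp only [stepTok, st0, h0, Option.map_none, if_true, zero_add]
      rw [runTok_none]; rfl
    | some v =>
      simp only [stepTok, st0, h0, Option.map_some, if_true, zero_add]
      simp [runTok, resA, addTok_nil]
  | [t0, t1], _ =>
    rw [runTok_cons, Option.bind_some]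
    cases h0 : PySem.Int.ofChars? t0 with
    | none =>
      simp only [stepTok, st0, h0, Option.map_none, if_true, zero_add]
      rw [runTok_none]; rfl
    | some v =>
      simp only [stepTok, st0, h0, Option.map_some, if_true, zero_add]
      rw [runTok_cons, Option.bind_some]
      rw [show stepTok { token := [], cnt := 1, n1 := v, n2 := 0, logic := [] } t1
          = some { token := [], cnt := 2, n1 := v, n2 := 0, logic := relopA t1 } from by
        norm_num [stepTok]]
      simp [runTok, resA, addTok_nil]

-- if the final token is nonempty, A gives "wrong"
lemma resA_last_ne (o : Option StA) (lastTok : List Char) (h : lastTok ≠ [])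
    (hinv : ∀ st', o = some st' → st'.token = []) :
    resA o lastTok = "wrong" := by
  cases o with
  | none => rfl
  | some st' =>
    have := hinv st' rfl
    simp [resA, addTok, this, h]

lemma runTok_token_nil (ts : List (List Char)) : ∀ (st : StA), st.token = [] →
    ∀ st', runTok (some st) ts = some st' → st'.token = [] := by
  induction ts with
  | nil =>
    intro st hst st' h
    simp only [runTok, List.foldl_nil, Option.some_inj] at h
    exact h ▸ hst
  | cons t ts ih =>
    intro st hst st' h
    rw [runTok_cons, Option.bind_some] at h
    cases hs : stepTok st t with
    | none =>
      rw [hs, runTok_none] at h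
      cases h
    | some st'' =>
      rw [hs] at h
      exact ih st'' (stepTok_token_nil st st'' t hs) st' h

-- ===== VERDICT (by name: the statement is the Claim_ definition above) =====
theorem bexpr_spec : Claim_equal_bexpr := by
  intro array _
  unfold Spec_bexpr
  rw [bexpr_eq_resA, bexpr_alt_eq]
  by_cases hlast : (splitSp array.toList).getLastD [] ≠ []
  · rw [if_pos hlast]
    exact resA_last_ne _ _ hlast (runTok_token_nil _ st0 rfl)
  · rw [if_neg hlast]
    rw [not_ne_iff] at hlast
    rw [hlast]
    by_cases hlen :
        ((splitSp array.toList).dropLast.filter (fun p => p ≠ [])).length < 3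
    · rw [if_pos hlen]
      exact runTok_short _ hlen
    · rw [if_neg hlen]
      cases hx : (splitSp array.toList).dropLast.filter (fun p => p ≠ []) with
      | nil => rw [hx] at hlen; simp at hlen
      | cons t0 r0 =>
        cases r0 with
        | nil => rw [hx] at hlen; simp at hlen
        | cons t1 r1 =>
          cases r1 with
          | nil => rw [hx] at hlen; simp at hlen
          | cons t2 rest =>
            rw [runTok_result]
            rfl
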